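-- pv_equiv track=rewrite | github.com/FarhiaAfroj/leetcode | 0934-bitwise-ors-of-subarrays/0934-bitwise-ors-of-subarrays.py | subarrayBitwiseORs
-- ===== SOURCE A (Python) =====
-- def subarrayBitwiseORs(arr):
--     ans = set()
--     cur_or = set()
--     for x in arr:
--         nxt = {x}
--         for v in cur_or:
--             nxt.add(v | x)
--         cur_or = nxt
--         ans |= cur_or
--     return len(ans)
-- ===== SOURCE B (Python) =====
-- def subarrayBitwiseORs(arr):
--     ans = set()
--     t = arr
--     while t:
--         cur = 0
--         for v in t:
--             cur |= v
--             ans.add(cur)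
--         t = t[1:]
--     return len(ans)
-- ===== Notes on version B (the rewrite author's own statement) =====
-- stated objective: simpler
-- what changed: Replaced the propagating frontier-set of ORs-ending-here with a plain brute-force scan: for every suffix of the array, accumulate a running OR over its prefixes and add each value to one result set.
import Mathlib
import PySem

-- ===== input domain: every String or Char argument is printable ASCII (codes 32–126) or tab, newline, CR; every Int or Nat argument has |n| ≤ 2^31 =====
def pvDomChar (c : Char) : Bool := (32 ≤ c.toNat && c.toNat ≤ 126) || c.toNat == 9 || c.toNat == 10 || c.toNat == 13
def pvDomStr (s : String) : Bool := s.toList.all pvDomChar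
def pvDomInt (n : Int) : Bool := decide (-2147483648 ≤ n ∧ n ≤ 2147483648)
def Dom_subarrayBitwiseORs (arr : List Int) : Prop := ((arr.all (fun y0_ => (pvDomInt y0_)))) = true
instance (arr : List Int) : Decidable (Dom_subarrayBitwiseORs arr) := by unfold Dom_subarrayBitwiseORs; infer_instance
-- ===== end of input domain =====

-- B replaces A's frontier set of ORs-ending-here by a brute-force scan of all suffixes
-- with a running OR (objective: simpler). Return-value equivalence; neither mutates its argument.

-- ===== PORT A =====
-- one step of A's outer loop: state (ans, cur_or), element x
def pvStepA (p : PySem.Set Int × PySem.Set Int) (x : Int) : PySem.Set Int × PySem.Set Int :=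
  let nxt := p.2.foldl (fun s v => PySem.Set.add s (PySem.Int.bor v x)) (PySem.Set.ofList [x])
  (PySem.Set.union p.1 nxt, nxt)

def subarrayBitwiseORs (arr : List Int) : Int :=
  let p := arr.foldl pvStepA (PySem.Set.empty, PySem.Set.empty)
  PySem.Set.len p.1

-- ===== PORT B =====
-- the inner 'for v in t: cur |= v; ans.add(cur)' loop of Source B
def pvInnerB (ans : PySem.Set Int) (t : List Int) : PySem.Set Int :=
  (t.foldl (fun (q : PySem.Set Int × Int) v =>
      (PySem.Set.add q.1 (PySem.Int.bor q.2 v), PySem.Int.bor q.2 v)) (ans, 0)).1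

-- the 'while t: … ; t = t[1:]' loop; t[1:] on a nonempty list is its tail (PySem.List.slice_from)
def pvOuterB : List Int → PySem.Set Int → PySem.Set Int
  | [], ans => ans
  | x :: t, ans => pvOuterB t (pvInnerB ans (x :: t))

def subarrayBitwiseORs_alt (arr : List Int) : Int :=
  PySem.Set.len (pvOuterB arr PySem.Set.empty)

-- ===== PRECONDITION & SPEC =====
def Spec_subarrayBitwiseORs (arr : List Int) (out : Int) : Prop := out = subarrayBitwiseORs_alt arr
instance (arr : List Int) (out : Int) : Decidable (Spec_subarrayBitwiseORs arr out) := by unfold Spec_subarrayBitwiseORs; infer_instance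

-- ===== CLAIM (what is proved, stated in full; the proofs are below) =====
def Claim_equal_subarrayBitwiseORs : Prop := ∀ (arr : List Int), Dom_subarrayBitwiseORs arr → Spec_subarrayBitwiseORs arr (subarrayBitwiseORs arr)

-- ===== LEMMAS AND PROOFS =====

-- OR of a contiguous segment, as both loops compute it (left fold from 0)
def pvSegOr (l : List Int) : Int := l.foldl PySem.Int.bor 0

-- v is the OR of some nonempty suffix of t
def pvSuffP (t : List Int) (v : Int) : Prop := ∃ l₁ l₂, t = l₁ ++ l₂ ∧ l₂ ≠ [] ∧ pvSegOr l₂ = v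
-- v is the OR of some nonempty prefix of t
def pvPrefP (t : List Int) (v : Int) : Prop := ∃ p q, t = p ++ q ∧ p ≠ [] ∧ pvSegOr p = v
-- v is the OR of some nonempty contiguous subarray of t
def pvSubP (t : List Int) (v : Int) : Prop := ∃ l₁ l₂ l₃, t = l₁ ++ l₂ ++ l₃ ∧ l₂ ≠ [] ∧ pvSegOr l₂ = v

theorem pv_zero_bor (a : Int) : PySem.Int.bor 0 a = a := by
  rw [PySem.Int.bor_comm]; exact PySem.Int.bor_zero a

theorem pvSuffP_nil (v : Int) : ¬ pvSuffP [] v := by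
  rintro ⟨l₁, l₂, h, hne, -⟩
  rcases List.append_eq_nil_iff.mp h.symm with ⟨-, h2⟩
  exact hne h2

theorem pvSubP_nil (v : Int) : ¬ pvSubP [] v := by
  rintro ⟨l₁, l₂, l₃, h, hne, -⟩
  rcases List.append_eq_nil_iff.mp h.symm with ⟨h1, -⟩
  rcases List.append_eq_nil_iff.mp h1 with ⟨-, h2⟩
  exact hne h2

theorem pvSuffP_snoc (arr : List Int) (x v : Int) :
    pvSuffP (arr ++ [x]) v ↔ v = x ∨ ∃ w, pvSuffP arr w ∧ PySem.Int.bor w x = v := by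
  constructor
  · rintro ⟨l₁, l₂, h, hne, hv⟩
    rcases List.eq_nil_or_concat l₂ with rfl | ⟨l₂', y, rfl⟩
    · exact absurd rfl hne
    · have h' : l₁ ++ l₂' ++ [y] = arr ++ [x] := by simpa [List.append_assoc] using h.symm
      obtain ⟨h1, h2⟩ := List.append_inj' h' rfl
      have hyx : y = x := by simpa using h2
      subst hyx
      rcases List.eq_nil_or_concat l₂' with rfl | ⟨l₂'', z, rfl⟩
      · left
        simpa [pvSegOr, pv_zero_bor] using hv.symm
      · right
        refine ⟨pvSegOr (l₂'' ++ [z]), ⟨l₁, l₂'' ++ [z], by simpa [List.concat_eq_append] using h1.symm, by simp, rfl⟩, ?_⟩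
        simpa [pvSegOr, List.concat_eq_append, List.foldl_append] using hv
  · intro h
    rcases h with h | ⟨w, hw, rfl⟩
    · exact ⟨arr, [x], rfl, by simp, by simp [pvSegOr, pv_zero_bor, h]⟩
    · obtain ⟨l₁, l₂, rfl, hne, rfl⟩ := hw
      exact ⟨l₁, l₂ ++ [x], by simp, by simp, by simp [pvSegOr, List.foldl_append]⟩

theorem pvSubP_snoc (arr : List Int) (x v : Int) :
    pvSubP (arr ++ [x]) v ↔ pvSubP arr v ∨ pvSuffP (arr ++ [x]) v := by
  constructor
  · rintro ⟨l₁, l₂, l₃, h, hne, hv⟩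
    rcases List.eq_nil_or_concat l₃ with rfl | ⟨l₃', y, rfl⟩
    · right; exact ⟨l₁, l₂, by simpa using h, hne, hv⟩
    · left
      have h' : (l₁ ++ l₂ ++ l₃') ++ [y] = arr ++ [x] := by simpa [List.append_assoc] using h.symm
      obtain ⟨h1, -⟩ := List.append_inj' h' rfl
      exact ⟨l₁, l₂, l₃', h1.symm, hne, hv⟩
  · rintro (⟨l₁, l₂, l₃, rfl, hne, hv⟩ | ⟨l₁, l₂, h, hne, hv⟩)
    · exact ⟨l₁, l₂, l₃ ++ [x], by simp, hne, hv⟩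
    · exact ⟨l₁, l₂, [], by simpa using h, hne, hv⟩

theorem pvSubP_cons (a : Int) (t : List Int) (v : Int) :
    pvSubP (a :: t) v ↔ pvPrefP (a :: t) v ∨ pvSubP t v := by
  constructor
  · rintro ⟨l₁, l₂, l₃, h, hne, hv⟩
    cases l₁ with
    | nil => exact Or.inl ⟨l₂, l₃, by simpa using h, hne, hv⟩
    | cons b l₁' =>
      right
      have h' : t = l₁' ++ l₂ ++ l₃ := by simpa using congrArg List.tail h
      exact ⟨l₁', l₂, l₃, h', hne, hv⟩
  · rintro (⟨p, q, h, hne, hv⟩ | ⟨l₁, l₂, l₃, rfl, hne, hv⟩)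
    · exact ⟨[], p, q, by simpa using h, hne, hv⟩
    · exact ⟨a :: l₁, l₂, l₃, by simp, hne, hv⟩

-- ===== A-side invariant =====
theorem pvA_inv (arr : List Int) :
    ((arr.foldl pvStepA (PySem.Set.empty, PySem.Set.empty)).2.Nodup ∧
      ∀ v, v ∈ (arr.foldl pvStepA (PySem.Set.empty, PySem.Set.empty)).2 ↔ pvSuffP arr v) ∧
    ((arr.foldl pvStepA (PySem.Set.empty, PySem.Set.empty)).1.Nodup ∧
      ∀ v, v ∈ (arr.foldl pvStepA (PySem.Set.empty, PySem.Set.empty)).1 ↔ pvSubP arr v) := by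
  induction arr using List.reverseRecOn with
  | nil =>
    refine ⟨⟨List.nodup_nil, fun v => ?_⟩, List.nodup_nil, fun v => ?_⟩ <;>
      simp [PySem.Set.empty, pvSuffP_nil, pvSubP_nil]
  | append_singleton arr x ih =>
    obtain ⟨⟨hcn, hcm⟩, han, ham⟩ := ih
    rw [List.foldl_append]
    simp only [List.foldl_cons, List.foldl_nil]
    set P := arr.foldl pvStepA (PySem.Set.empty, PySem.Set.empty)
    have hnxt : (pvStepA P x).2
        = P.2.foldl (fun s v => PySem.Set.add s (PySem.Int.bor v x)) (PySem.Set.ofList [x]) := rfl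
    have hnxt' : (pvStepA P x).2
        = PySem.Set.update (PySem.Set.ofList [x]) (P.2.map (fun v => PySem.Int.bor v x)) := by
      rw [hnxt, PySem.Set.update_map_eq_foldl_add]
    have hnm : ∀ v, v ∈ (pvStepA P x).2 ↔ pvSuffP (arr ++ [x]) v := by
      intro v
      rw [hnxt', PySem.Set.mem_update, pvSuffP_snoc]
      simp only [PySem.Set.mem_ofList, List.mem_singleton, List.mem_map]
      constructor
      · rintro (rfl | ⟨w, hw, rfl⟩)
        · exact Or.inl rfl
        · exact Or.inr ⟨w, (hcm w).mp hw, rfl⟩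
      · rintro (rfl | ⟨w, hw, rfl⟩)
        · exact Or.inl rfl
        · exact Or.inr ⟨w, (hcm w).mpr hw, rfl⟩
    have hnn : (pvStepA P x).2.Nodup := by
      rw [hnxt']; exact PySem.Set.nodup_update _ _ (PySem.Set.nodup_ofList _)
    refine ⟨⟨hnn, hnm⟩, ?_, ?_⟩
    · exact PySem.Set.nodup_union _ _ han
    · intro v
      have : v ∈ (pvStepA P x).1 ↔ v ∈ P.1 ∨ v ∈ (pvStepA P x).2 := by
        exact PySem.Set.mem_union _ _ v
      rw [this, pvSubP_snoc, ham v, hnm v]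

-- ===== B-side invariant =====
theorem pvInner_inv (t : List Int) : ∀ (ans : PySem.Set Int) (c : Int),
    ((ans.Nodup → ((t.foldl (fun (q : PySem.Set Int × Int) v =>
        (PySem.Set.add q.1 (PySem.Int.bor q.2 v), PySem.Int.bor q.2 v)) (ans, c)).1).Nodup) ∧
     ∀ v, v ∈ (t.foldl (fun (q : PySem.Set Int × Int) v =>
        (PySem.Set.add q.1 (PySem.Int.bor q.2 v), PySem.Int.bor q.2 v)) (ans, c)).1 ↔
        v ∈ ans ∨ ∃ p q, t = p ++ q ∧ p ≠ [] ∧ p.foldl PySem.Int.bor c = v) := by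
  induction t with
  | nil =>
    intro ans c
    refine ⟨fun h => h, fun v => ?_⟩
    simp only [List.foldl_nil]
    constructor
    · exact Or.inl
    · rintro (h | ⟨p, q, h, hne, -⟩)
      · exact h
      · rcases List.append_eq_nil_iff.mp h.symm with ⟨h1, -⟩
        exact absurd h1 hne
  | cons a t' ih =>
    intro ans c
    simp only [List.foldl_cons]
    obtain ⟨ihn, ihm⟩ := ih (PySem.Set.add ans (PySem.Int.bor c a)) (PySem.Int.bor c a)
    refine ⟨fun h => ihn (PySem.Set.nodup_add _ _ h), fun v => ?_⟩
    rw [ihm v, PySem.Set.mem_add]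
    constructor
    · rintro ((h | rfl) | ⟨p, q, rfl, hne, rfl⟩)
      · exact Or.inl h
      · exact Or.inr ⟨[a], t', rfl, by simp, rfl⟩
      · exact Or.inr ⟨a :: p, q, rfl, by simp, rfl⟩
    · rintro (h | ⟨p, q, hpq, hne, rfl⟩)
      · exact Or.inl (Or.inl h)
      · cases p with
        | nil => exact absurd rfl hne
        | cons b p' =>
          have hb : b = a := by simpa using (congrArg (fun l => l.headI) hpq).symm
          subst hb
          have ht : t' = p' ++ q := by simpa using congrArg List.tail hpq
          rcases List.eq_nil_or_concat p' with rfl | ⟨p'', z, rfl⟩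
          · left; right
            simp
          · right
            exact ⟨p'' ++ [z], q, by simpa [List.concat_eq_append] using ht, by simp, by simp [List.foldl_cons]⟩

theorem pvInnerB_inv (ans : PySem.Set Int) (t : List Int) (h : ans.Nodup) :
    (pvInnerB ans t).Nodup ∧ ∀ v, v ∈ pvInnerB ans t ↔ v ∈ ans ∨ pvPrefP t v := by
  obtain ⟨hn, hm⟩ := pvInner_inv t ans 0
  exact ⟨hn h, fun v => hm v⟩

theorem pvB_inv (arr : List Int) : ∀ (ans : PySem.Set Int), ans.Nodup →
    (pvOuterB arr ans).Nodup ∧ ∀ v, v ∈ pvOuterB arr ans ↔ v ∈ ans ∨ pvSubP arr v := by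
  induction arr with
  | nil =>
    intro ans h
    exact ⟨h, fun v => ⟨Or.inl, fun hv => hv.elim id fun hs => absurd hs (pvSubP_nil v)⟩⟩
  | cons a t ih =>
    intro ans h
    obtain ⟨hin, him⟩ := pvInnerB_inv ans (a :: t) h
    obtain ⟨hon, hom⟩ := ih (pvInnerB ans (a :: t)) hin
    refine ⟨hon, fun v => ?_⟩
    show v ∈ pvOuterB t (pvInnerB ans (a :: t)) ↔ _
    rw [hom v, him v, pvSubP_cons]
    tauto


-- ===== VERDICT (by name: the statement is the Claim_ definition above) =====
theorem subarrayBitwiseORs_spec : Claim_equal_subarrayBitwiseORs := by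
  intro arr _
  unfold Spec_subarrayBitwiseORs subarrayBitwiseORs subarrayBitwiseORs_alt
  obtain ⟨-, hAn, hAm⟩ := pvA_inv arr
  obtain ⟨hBn, hBm⟩ := pvB_inv arr PySem.Set.empty List.nodup_nil
  have hperm : (arr.foldl pvStepA (PySem.Set.empty, PySem.Set.empty)).1.Perm
      (pvOuterB arr PySem.Set.empty) := by
    rw [List.perm_ext_iff_of_nodup hAn hBn]
    intro v
    rw [hAm v, hBm v]
    simp [PySem.Set.empty]
  simp only [PySem.Set.len, hperm.length_eq]
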